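-- pv_equiv track=rewrite | github.com/SuperOptimizer/villa | vesuvius/src/vesuvius/neural_tracing/inference/generate_segment_cover_bboxes.py | _select_napari_bands
-- ===== SOURCE A (Python) =====
-- def _select_napari_bands(bbox_records, num_bands=None):
--     bands = sorted({int(item["z_band"]) for item in bbox_records})
--     if num_bands is None:
--         return bands
--     limit = int(num_bands)
--     if limit <= 0:
--         return bands
--     start = bands[0] if bands else 0
--     selected = set(range(int(start), int(start) + limit))
--     return [band for band in bands if band in selected]
-- ===== SOURCE B (Python) =====
-- def _select_napari_bands(bbox_records, num_bands=None):
--     bands = sorted({int(item["z_band"]) for item in bbox_records})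
--     if num_bands is None:
--         return bands
--     limit = int(num_bands)
--     if limit <= 0:
--         return bands
--     if not bands:
--         return bands
--     # bands is sorted and bands[0] is its minimum, so the windowed selection
--     # is exactly the prefix of values below bands[0] + limit: find the cut
--     # point by binary search and slice, instead of materialising a membership
--     # set of the whole window and filtering.
--     hi = bands[0] + limit
--     lo, up = 0, len(bands)
--     while lo < up:
--         mid = (lo + up) // 2
--         if bands[mid] < hi:
--             lo = mid + 1
--         else:
--             up = mid
--     return bands[:lo]
-- ===== Notes on version B (the rewrite author's own statement) =====
-- stated objective: alternative
-- what changed: The windowed case no longer builds set(range(start, start+limit)) and filters by membership: since bands is sorted with bands[0] minimal, B binary-searches the cut point bands[i] < bands[0]+limit and returns the slice bands[:cut], never materialising the O(limit) window set.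
import Mathlib
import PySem

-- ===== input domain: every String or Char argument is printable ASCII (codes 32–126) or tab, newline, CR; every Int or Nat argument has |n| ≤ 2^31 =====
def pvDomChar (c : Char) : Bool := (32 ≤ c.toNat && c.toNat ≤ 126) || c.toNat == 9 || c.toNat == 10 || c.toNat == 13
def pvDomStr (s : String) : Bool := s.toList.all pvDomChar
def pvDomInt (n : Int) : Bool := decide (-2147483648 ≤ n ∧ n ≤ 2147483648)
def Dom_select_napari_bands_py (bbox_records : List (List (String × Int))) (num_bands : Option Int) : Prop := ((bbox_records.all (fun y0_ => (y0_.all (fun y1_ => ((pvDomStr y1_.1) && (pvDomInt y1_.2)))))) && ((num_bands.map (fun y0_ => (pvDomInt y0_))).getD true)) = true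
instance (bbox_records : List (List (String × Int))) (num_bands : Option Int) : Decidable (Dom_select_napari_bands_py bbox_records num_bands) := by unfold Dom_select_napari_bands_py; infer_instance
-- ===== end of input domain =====

-- B replaces A's window membership set + filter by a binary search for the cut point and a slice of the sorted bands (objective: alternative; no O(limit) window set is built).


-- ===== PORT A =====
-- item["z_band"]: first-match dict lookup; total via getD 0, exact under Pre_ (every record has the key)
-- first-match association-list lookup = Python dict indexing (exact under Pre_: the key is present)
def pvGetZ (item : List (String × Int)) : Int := ((item.find? (fun p => p.1 == "z_band")).map Prod.snd).getD 0

def select_napari_bands_py (bbox_records : List (List (String × Int))) (num_bands : Option Int) : List Int :=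
  let bands := PySem.List.sorted (PySem.Set.ofList (bbox_records.map pvGetZ)) (fun x => x) false
  match num_bands with
  | none => bands
  | some nb =>
    if nb ≤ 0 then bands
    else
      let start := bands.headD 0
      let selected : PySem.Set Int := PySem.Set.ofList (PySem.List.pyRange start (start + nb) 1)
      bands.filter (fun b => PySem.Set.contains selected b)

-- ===== PORT B =====
-- the while-loop of Source B: binary search for the first index with ¬ bands[mid] < hi
def pvBSearch (bands : List Int) (hi : Int) (lo up : Nat) : Nat :=
  if h : lo < up then
    let mid := (lo + up) / 2
    if bands.getD mid 0 < hi then pvBSearch bands hi (mid + 1) up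
    else pvBSearch bands hi lo mid
  else lo
termination_by up - lo
decreasing_by all_goals omega

def select_napari_bands_py_alt (bbox_records : List (List (String × Int))) (num_bands : Option Int) : List Int :=
  let bands := PySem.List.sorted (PySem.Set.ofList (bbox_records.map pvGetZ)) (fun x => x) false
  match num_bands with
  | none => bands
  | some nb =>
    if nb ≤ 0 then bands
    else match bands with
      | [] => bands
      | b0 :: _ =>
        let hi := b0 + nb
        bands.take (pvBSearch bands hi 0 bands.length)

-- ===== PRECONDITION & SPEC =====
-- Pre_ excludes records missing the "z_band" key, on which A raises KeyError.
def Pre_select_napari_bands_py (bbox_records : List (List (String × Int))) (num_bands : Option Int) : Prop :=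
  bbox_records.all (fun item => item.any (fun p => p.1 == "z_band")) = true
instance (bbox_records : List (List (String × Int))) (num_bands : Option Int) : Decidable (Pre_select_napari_bands_py bbox_records num_bands) := by unfold Pre_select_napari_bands_py; infer_instance
def pvWitness_select_napari_bands_py : (List (List (String × Int))) × Option Int := ([[("z_band", 3)], [("z_band", 7), ("x", 1)]], some 2)

def Spec_select_napari_bands_py (bbox_records : List (List (String × Int))) (num_bands : Option Int) (out : List Int) : Prop := out = select_napari_bands_py_alt bbox_records num_bands
instance (bbox_records : List (List (String × Int))) (num_bands : Option Int) (out : List Int) : Decidable (Spec_select_napari_bands_py bbox_records num_bands out) := by unfold Spec_select_napari_bands_py; infer_instance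

-- ===== CLAIM (what is proved, stated in full; the proofs are below) =====
def Claim_equal_select_napari_bands_py : Prop := ∀ (bbox_records : List (List (String × Int))) (num_bands : Option Int), Dom_select_napari_bands_py bbox_records num_bands → Pre_select_napari_bands_py bbox_records num_bands → Spec_select_napari_bands_py bbox_records num_bands (select_napari_bands_py bbox_records num_bands)

-- ===== LEMMAS AND PROOFS =====

-- index/takeWhile characterisation on a ≤-sorted list
theorem pv_tw_key (l : List Int) (hv : Int) (hs : l.Pairwise (· ≤ ·)) (i : Nat) (hi : i < l.length) :
    (l[i] < hv ↔ i < (l.takeWhile (fun b => decide (b < hv))).length) := by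
  induction l generalizing i with
  | nil => simp at hi
  | cons x t ih =>
    rcases List.pairwise_cons.mp hs with ⟨hx, ht⟩
    by_cases hxv : x < hv
    · simp only [List.takeWhile_cons, hxv, decide_true, if_true, List.length_cons]
      cases i with
      | zero => simpa using hxv
      | succ j =>
        have hj : j < t.length := by simpa using hi
        simpa using ih ht j hj
    · simp only [List.takeWhile_cons, hxv, decide_false, Bool.false_eq_true, if_false,
        List.length_nil]
      constructor
      · intro h
        exfalso
        cases i with
        | zero => exact hxv (by simpa using h)
        | succ j =>
          have hj : j < t.length := by simpa using hi
          have h1 : x ≤ t[j] := hx _ (List.getElem_mem hj)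
          have h2 : (x :: t)[j+1] = t[j] := by simp
          rw [h2] at h
          omega
      · omega

-- binary-search loop correctness: it returns the takeWhile length
theorem pv_bsearch_eq (l : List Int) (hv : Int) (hs : l.Pairwise (· ≤ ·)) :
    ∀ lo up, lo ≤ (l.takeWhile (fun b => decide (b < hv))).length →
      (l.takeWhile (fun b => decide (b < hv))).length ≤ up → up ≤ l.length →
      pvBSearch l hv lo up = (l.takeWhile (fun b => decide (b < hv))).length := by
  intro lo up
  induction lo, up using pvBSearch.induct l hv with
  | case1 lo up h mid hlt ih =>
    intro h1 h2 h3
    have hmid : mid = (lo + up) / 2 := rfl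
    have hmlen : mid < l.length := by omega
    rw [List.getD_eq_getElem l 0 hmlen] at hlt
    have hk := (pv_tw_key l hv hs mid hmlen).mp hlt
    rw [pvBSearch]
    simp only [h, dite_true]
    split
    · exact ih (by omega) h2 h3
    · next hfalse =>
        rw [List.getD_eq_getElem l 0 hmlen] at hfalse
        exact absurd hlt hfalse
  | case2 lo up h mid hlt ih =>
    intro h1 h2 h3
    have hmid : mid = (lo + up) / 2 := rfl
    have hmlen : mid < l.length := by omega
    rw [List.getD_eq_getElem l 0 hmlen] at hlt
    have hk : ¬ mid < (l.takeWhile (fun b => decide (b < hv))).length :=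
      fun hc => hlt ((pv_tw_key l hv hs mid hmlen).mpr hc)
    rw [pvBSearch]
    simp only [h, dite_true]
    split
    · next htrue =>
        rw [List.getD_eq_getElem l 0 hmlen] at htrue
        exact absurd htrue hlt
    · exact ih h1 (by omega) (by omega)
  | case3 lo up h =>
    intro h1 h2 _
    rw [pvBSearch]
    simp only [h, dite_false]
    omega

-- filter = takeWhile for a downward-closed predicate on a ≤-sorted list
theorem pv_filter_sorted_eq_takeWhile (l : List Int) (hv : Int) (hs : l.Pairwise (· ≤ ·)) :
    l.filter (fun b => decide (b < hv)) = l.takeWhile (fun b => decide (b < hv)) := by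
  induction l with
  | nil => rfl
  | cons x t ih =>
    rcases List.pairwise_cons.mp hs with ⟨hx, ht⟩
    by_cases hxv : x < hv
    · simp only [List.filter_cons, List.takeWhile_cons, hxv, decide_true, if_true]
      exact congrArg (x :: ·) (ih ht)
    · simp only [List.filter_cons, List.takeWhile_cons, hxv, decide_false, if_false]
      refine List.filter_eq_nil_iff.mpr ?_
      intro b hb
      have := hx b hb
      simp only [decide_eq_true_eq]
      omega

theorem pv_contains_window (start hv b : Int) :
    PySem.Set.contains (PySem.Set.ofList (PySem.List.pyRange start hv 1)) b =
      decide (start ≤ b ∧ b < hv) := by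
  rw [Bool.eq_iff_iff, PySem.Set.contains_iff, PySem.Set.mem_ofList, PySem.List.mem_pyRange_one]
  simp

-- ===== VERDICT (by name: the statement is the Claim_ definition above) =====
theorem select_napari_bands_py_spec : Claim_equal_select_napari_bands_py := by
  intro bbox_records num_bands _ _
  unfold Spec_select_napari_bands_py select_napari_bands_py select_napari_bands_py_alt
  cases num_bands with
  | none => rfl
  | some nb =>
    simp only
    by_cases hnb : nb ≤ 0
    · simp [hnb]
    · simp only [hnb, if_false]
      have hsort : (PySem.List.sorted (PySem.Set.ofList (bbox_records.map pvGetZ)) (fun x => x) false).Pairwise (· < ·) :=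
        PySem.List.sorted_ofList_pairwise_lt _
      cases hb : PySem.List.sorted (PySem.Set.ofList (bbox_records.map pvGetZ)) (fun x => x) false with
      | nil => simp
      | cons b0 t =>
        rw [hb] at hsort
        have hsle : (b0 :: t).Pairwise (· ≤ ·) := hsort.imp (fun hx => le_of_lt hx)
        have hle : ∀ b ∈ (b0 :: t), b0 ≤ b := by
          intro b hbm
          rcases List.mem_cons.mp hbm with rfl | hbm
          · exact le_refl _
          · exact le_of_lt ((List.pairwise_cons.mp hsort).1 b hbm)
        have hfil : (b0 :: t).filter
            (fun b => PySem.Set.contains (PySem.Set.ofList (PySem.List.pyRange b0 (b0 + nb) 1)) b) =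
            (b0 :: t).takeWhile (fun b => decide (b < b0 + nb)) := by
          rw [List.filter_congr (q := fun b => decide (b < b0 + nb))
              (fun b hbm => by rw [pv_contains_window]; simp [hle b hbm])]
          exact pv_filter_sorted_eq_takeWhile (b0 :: t) (b0 + nb) hsle
        have hbs : pvBSearch (b0 :: t) (b0 + nb) 0 (b0 :: t).length =
            ((b0 :: t).takeWhile (fun b => decide (b < b0 + nb))).length :=
          pv_bsearch_eq (b0 :: t) (b0 + nb) hsle 0 (b0 :: t).length
            (Nat.zero_le _) (List.takeWhile_prefix _).length_le (le_refl _)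
        have htake : (b0 :: t).take ((b0 :: t).takeWhile (fun b => decide (b < b0 + nb))).length =
            (b0 :: t).takeWhile (fun b => decide (b < b0 + nb)) :=
          (List.prefix_iff_eq_take.mp (List.takeWhile_prefix _)).symm
        simp only [List.headD_cons]
        rw [hfil, hbs, htake]
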